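-- pv_equiv track=rewrite | github.com/joilsonlira/python_estudo | verify.py | conjuntos_repetidos
-- ===== SOURCE A (Python) =====
-- def conjuntos_repetidos(a,b):
--     dezenas = []
--     del dezenas[:]
--
--     for i in range(len(a)):
--         for k in range(len(b)):
--             if a[i] == b[k]:
--                 dezenas.append(a[i])
--
--
--     return sorted(dezenas)
-- ===== SOURCE B (Python) =====
-- def conjuntos_repetidos(a, b):
--     ca = {}
--     for x in a:
--         ca[x] = ca.get(x, 0) + 1
--     cb = {}
--     for y in b:
--         cb[y] = cb.get(y, 0) + 1
--     out = []
--     for v in sorted(ca):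
--         if v in cb:
--             out += [v] * (ca[v] * cb[v])
--     return out
-- ===== Notes on version B (the rewrite author's own statement) =====
-- stated objective: faster
-- what changed: Replaces A's nested scan of all (i,k) pairs (then sorting the collected duplicates) by two counting dicts and a single pass over the sorted distinct values of a, emitting each common value count_a(v)*count_b(v) times.
import Mathlib
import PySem

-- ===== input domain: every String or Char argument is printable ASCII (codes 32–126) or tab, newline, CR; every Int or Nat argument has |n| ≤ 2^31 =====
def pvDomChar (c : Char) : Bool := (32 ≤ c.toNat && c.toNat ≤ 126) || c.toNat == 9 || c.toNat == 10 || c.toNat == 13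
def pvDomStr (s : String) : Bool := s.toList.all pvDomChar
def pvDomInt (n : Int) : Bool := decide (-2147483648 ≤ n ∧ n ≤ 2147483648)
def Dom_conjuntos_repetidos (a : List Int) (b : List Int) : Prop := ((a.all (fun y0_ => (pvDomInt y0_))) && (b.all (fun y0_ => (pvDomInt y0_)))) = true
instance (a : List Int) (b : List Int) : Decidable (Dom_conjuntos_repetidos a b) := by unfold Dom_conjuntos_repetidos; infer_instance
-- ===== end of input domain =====

-- B replaces A's nested scans over a and b by counting dicts and one pass over the sorted
-- distinct values of `a`, emitting each common value count_a*count_b times (objective: faster).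

-- ===== PORT A =====
-- the nested for-loops filling `dezenas` ([] after `del dezenas[:]`), then sorted(dezenas)
def conjuntos_repetidos (a : List Int) (b : List Int) : List Int :=
  PySem.List.sorted
    ((PySem.List.pyRange 0 (PySem.List.len a)).foldl (fun acc i =>
      (PySem.List.pyRange 0 (PySem.List.len b)).foldl (fun acc2 k =>
        if PySem.List.pyGetD a i 0 = PySem.List.pyGetD b k 0
        then acc2 ++ [PySem.List.pyGetD a i 0] else acc2) acc) ([] : List Int))
    (fun x => x)

-- ===== PORT B =====
-- B's counting loop `for x in xs: c[x] = c.get(x, 0) + 1` (used for ca and cb)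
def pvCounterOf (xs : List Int) : PySem.Dict Int Int :=
  xs.foldl (fun d x => d.insert x (d.getD x 0 + 1)) PySem.Dict.empty

def conjuntos_repetidos_alt (a : List Int) (b : List Int) : List Int :=
  (PySem.List.sorted (pvCounterOf a).keys (fun v => v)).foldl (fun out v =>
    if (pvCounterOf b).contains v
    then out ++ PySem.List.pyRepeat [v] ((pvCounterOf a).getD v 0 * (pvCounterOf b).getD v 0)
    else out) []

-- ===== PRECONDITION & SPEC =====
def Spec_conjuntos_repetidos (a : List Int) (b : List Int) (out : List Int) : Prop := out = conjuntos_repetidos_alt a b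
instance (a : List Int) (b : List Int) (out : List Int) : Decidable (Spec_conjuntos_repetidos a b out) := by unfold Spec_conjuntos_repetidos; infer_instance

-- ===== CLAIM (what is proved, stated in full; the proofs are below) =====
def Claim_equal_conjuntos_repetidos : Prop := ∀ (a : List Int) (b : List Int), Dom_conjuntos_repetidos a b → Spec_conjuntos_repetidos a b (conjuntos_repetidos a b)

-- ===== LEMMAS AND PROOFS =====

theorem pvCounterOf_eq (xs : List Int) : pvCounterOf xs = PySem.Dict.counter xs :=
  PySem.Dict.foldl_insert_getD_add_one_eq_counter xs

-- A's inner loop over b appends x once per element of b equal to x.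
theorem pv_inner_loop (b : List Int) (x : Int) (acc : List Int) :
    b.foldl (fun acc2 y => if x = y then acc2 ++ [x] else acc2) acc
      = acc ++ List.replicate (b.count x) x := by
  induction b generalizing acc with
  | nil => simp
  | cons y t ih =>
    by_cases h : x = y
    · subst h
      simp [List.foldl_cons, ih, List.replicate_succ]
    · have hne : (y == x) = false := by simpa using fun h' => h h'.symm
      simp [List.foldl_cons, ih, List.count_cons, h, hne]

-- A's accumulated list is the flatMap of per-element replicates.
theorem pv_dezenas_eq (a b : List Int) :
    (PySem.List.pyRange 0 (PySem.List.len a)).foldl (fun acc i =>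
      (PySem.List.pyRange 0 (PySem.List.len b)).foldl (fun acc2 k =>
        if PySem.List.pyGetD a i 0 = PySem.List.pyGetD b k 0
        then acc2 ++ [PySem.List.pyGetD a i 0] else acc2) acc) ([] : List Int)
      = a.flatMap (fun x => List.replicate (b.count x) x) := by
  have h1 : ∀ (acc : List Int) (x : Int),
      (PySem.List.pyRange 0 (PySem.List.len b)).foldl (fun acc2 k =>
        if x = PySem.List.pyGetD b k 0 then acc2 ++ [x] else acc2) acc
        = acc ++ List.replicate (b.count x) x := by
    intro acc x
    rw [PySem.List.foldl_pyRange_zero_pyGetD b 0 (fun acc2 y => if x = y then acc2 ++ [x] else acc2) acc]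
    exact pv_inner_loop b x acc
  rw [PySem.List.foldl_pyRange_zero_pyGetD a 0
      (fun acc x => (PySem.List.pyRange 0 (PySem.List.len b)).foldl (fun acc2 k =>
        if x = PySem.List.pyGetD b k 0 then acc2 ++ [x] else acc2) acc) []]
  rw [List.foldl_ext (g := fun acc x => acc ++ List.replicate (b.count x) x)
      (H := by intro acc x _; exact h1 acc x)]
  simpa using PySem.List.foldl_append_eq_flatMap (fun x => List.replicate (b.count x) x) a []

-- counting in the flatMap of per-element replicates
theorem pv_count_flatMap (a b : List Int) (v : Int) :
    (a.flatMap (fun x => List.replicate (b.count x) x)).count v = a.count v * b.count v := by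
  induction a with
  | nil => simp
  | cons x t ih =>
    by_cases h : x = v
    · subst h
      simp [List.count_append, ih]
      ring
    · simp [List.count_append, ih, List.count_replicate, List.count_cons,
        show (x == v) = false by simpa using h]

-- counting in a flatMap of replicates over a Nodup key list
theorem pv_count_flatMap_keys (ks : List Int) (n : Int → Nat) (v : Int) (hnd : ks.Nodup) :
    (ks.flatMap (fun u => List.replicate (n u) u)).count v
      = if v ∈ ks then n v else 0 := by
  induction ks with
  | nil => simp
  | cons x t ih =>
    rcases List.nodup_cons.mp hnd with ⟨hx, hnd'⟩
    by_cases h : x = v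
    · subst h
      simp [List.count_append, ih hnd', hx]
    · simp [List.count_append, ih hnd', List.count_replicate,
        show (x == v) = false by simpa using h, List.mem_cons,
        show ¬ v = x from fun h' => h h'.symm]

-- a flatMap of replicates over a strictly increasing key list is ≤-sorted
theorem pv_flatMap_pairwise (ks : List Int) (n : Int → Nat)
    (h : ks.Pairwise (· < ·)) :
    (ks.flatMap (fun u => List.replicate (n u) u)).Pairwise (· ≤ ·) := by
  induction ks with
  | nil => simp
  | cons x t ih =>
    rcases List.pairwise_cons.mp h with ⟨hx, h'⟩
    rw [List.flatMap_cons, List.pairwise_append]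
    refine ⟨?_, ih h', ?_⟩
    · rw [List.pairwise_replicate]; right; exact le_refl x
    · intro p hp q hq
      rcases List.mem_replicate.mp hp with ⟨-, rfl⟩
      rcases List.mem_flatMap.mp hq with ⟨u, hu, hq'⟩
      rcases List.mem_replicate.mp hq' with ⟨-, rfl⟩
      exact le_of_lt (hx _ hu)

-- B's loop over the sorted keys equals a flatMap of replicates of the products.
theorem pv_alt_eq (a b : List Int) :
    conjuntos_repetidos_alt a b
      = (PySem.List.sorted (PySem.Set.ofList a) (fun v => v)).flatMap
          (fun v => List.replicate (a.count v * b.count v) v) := by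
  unfold conjuntos_repetidos_alt
  rw [pvCounterOf_eq a, pvCounterOf_eq b, PySem.Dict.keys_counter a]
  have hmain : ∀ (ks : List Int) (init : List Int),
      ks.foldl (fun out v =>
        if (PySem.Dict.counter b).contains v
        then out ++ PySem.List.pyRepeat [v] ((PySem.Dict.counter a).getD v 0 * (PySem.Dict.counter b).getD v 0)
        else out) init
      = init ++ ks.flatMap (fun v => List.replicate (a.count v * b.count v) v) := by
    intro ks
    induction ks with
    | nil => intro init; simp
    | cons v t ih =>
      intro init
      rw [List.foldl_cons, List.flatMap_cons, ← List.append_assoc, ← ih]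
      congr 1
      by_cases hb : v ∈ b
      · have hc : (PySem.Dict.counter b).contains v = true := by
          rw [PySem.Dict.contains_counter]; simpa using hb
        rw [hc]
        simp only [if_true, PySem.Dict.getD_counter, PySem.List.pyRepeat_singleton]
        have : ((a.count v : Nat) : Int) * ((b.count v : Nat) : Int)
            = ((a.count v * b.count v : Nat) : Int) := by push_cast; ring
        rw [this, Int.toNat_natCast]
      · have hc : (PySem.Dict.counter b).contains v = false := by
          rw [PySem.Dict.contains_counter]; simpa using hb
        rw [hc]
        have : b.count v = 0 := List.count_eq_zero.mpr hb
        simp [this]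
  exact hmain _ []

theorem pv_main (a b : List Int) : conjuntos_repetidos a b = conjuntos_repetidos_alt a b := by
  rw [pv_alt_eq]
  unfold conjuntos_repetidos
  rw [pv_dezenas_eq a b]
  set ks := PySem.List.sorted (PySem.Set.ofList a) (fun v => v) with hks
  have hlt : ks.Pairwise (· < ·) := PySem.List.sorted_ofList_pairwise_lt a
  have hnd : ks.Nodup := hlt.imp ne_of_lt
  apply PySem.List.sorted_id_eq_of_perm_of_pairwise
  · rw [List.perm_iff_count]
    intro v
    rw [pv_count_flatMap_keys ks _ v hnd, pv_count_flatMap a b v]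
    by_cases hv : v ∈ ks
    · rw [if_pos hv]
    · have hva : v ∉ a := by
        intro hva
        exact hv ((PySem.List.mem_sorted _ _ _ v).mpr ((PySem.Set.mem_ofList a v).mpr hva))
      simp [List.count_eq_zero.mpr hva, hv]
  · exact pv_flatMap_pairwise ks _ hlt

-- ===== VERDICT (by name: the statement is the Claim_ definition above) =====
theorem conjuntos_repetidos_spec : Claim_equal_conjuntos_repetidos := by
  intro a b _
  exact pv_main a b
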